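-- pv_equiv track=rewrite | github.com/davidiach/erdos97 | data/runs/2026-05-06/bridge_lemma_attack_test.py | chords_cross
-- ===== SOURCE A (Python) =====
-- def chords_cross(a, b, c, d, order):
--     """Strict crossing in given cyclic order."""
--     pos = {v: i for i, v in enumerate(order)}
--     pa, pb, pc, pd = pos[a], pos[b], pos[c], pos[d]
--     n = len(order)
--     # rotate so pa = 0
--     delta_b = (pb - pa) % n
--     delta_c = (pc - pa) % n
--     delta_d = (pd - pa) % n
--     # c, d on different sides of chord (0, delta_b)?
--     return (delta_c < delta_b) != (delta_d < delta_b) and pc != pa and pd != pa and pc != pb and pd != pb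
-- ===== SOURCE B (Python) =====
-- def chords_cross(a, b, c, d, order):
--     """Strict crossing in given cyclic order."""
--     pos = {v: i for i, v in enumerate(order)}
--     pa, pb, pc, pd = pos[a], pos[b], pos[c], pos[d]
--     if pc in (pa, pb) or pd in (pa, pb):
--         return False
--     pts = sorted([(pa, 0), (pb, 0), (pc, 1), (pd, 1)], key=lambda t: t[0])
--     labels = [lab for _, lab in pts]
--     return labels in ([0, 1, 0, 1], [1, 0, 1, 0])
-- ===== Notes on version B (the rewrite author's own statement) =====
-- stated objective: alternative
-- what changed: Instead of rotating positions modulo n and side-testing against the chord (pa,pb), B sorts the four labelled endpoint positions and checks that the chord labels alternate; an early guard returns False when an endpoint of one chord coincides with one of the other.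
import Mathlib
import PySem

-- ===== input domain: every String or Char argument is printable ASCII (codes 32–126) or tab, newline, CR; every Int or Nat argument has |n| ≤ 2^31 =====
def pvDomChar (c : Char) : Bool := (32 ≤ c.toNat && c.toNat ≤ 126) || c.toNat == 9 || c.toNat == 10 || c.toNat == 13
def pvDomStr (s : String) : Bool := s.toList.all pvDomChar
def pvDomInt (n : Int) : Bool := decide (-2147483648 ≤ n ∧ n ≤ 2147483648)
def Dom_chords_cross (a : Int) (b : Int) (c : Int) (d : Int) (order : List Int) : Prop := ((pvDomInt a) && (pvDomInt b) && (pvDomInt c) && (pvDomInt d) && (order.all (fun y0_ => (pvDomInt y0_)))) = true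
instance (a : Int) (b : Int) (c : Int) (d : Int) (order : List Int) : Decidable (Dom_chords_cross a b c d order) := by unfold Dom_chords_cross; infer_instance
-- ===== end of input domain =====

-- B differs from A only in structure: A rotates so pa = 0 (modular deltas) and side-tests; B
-- sorts the four labelled positions and checks that the chord labels alternate.

-- ===== PORT A =====
-- pos = {v: i for i, v in enumerate(order)}  (shared line of both Pythons)
def pvPosDict (order : List Int) : PySem.Dict Int Int :=
  (PySem.List.enumerate order).foldl (fun dct iv => dct.insert iv.2 iv.1) PySem.Dict.empty

def chords_cross (a : Int) (b : Int) (c : Int) (d : Int) (order : List Int) : Bool :=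
  let pos := pvPosDict order
  -- pos[a] raises KeyError on a missing key; Pre_ excludes that, the total form uses default 0
  let pa := (pos.get? a).getD 0
  let pb := (pos.get? b).getD 0
  let pc := (pos.get? c).getD 0
  let pd := (pos.get? d).getD 0
  let n : Int := order.length
  let delta_b := PySem.Int.mod (pb - pa) n
  let delta_c := PySem.Int.mod (pc - pa) n
  let delta_d := PySem.Int.mod (pd - pa) n
  (decide (delta_c < delta_b) != decide (delta_d < delta_b))
    && !(pc == pa) && !(pd == pa) && !(pc == pb) && !(pd == pb)

-- ===== PORT B =====
def chords_cross_alt (a : Int) (b : Int) (c : Int) (d : Int) (order : List Int) : Bool :=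
  let pos := pvPosDict order
  let pa := (pos.get? a).getD 0
  let pb := (pos.get? b).getD 0
  let pc := (pos.get? c).getD 0
  let pd := (pos.get? d).getD 0
  if pc == pa || pc == pb || pd == pa || pd == pb then false
  else
    let pts := PySem.List.sorted [(pa, (0 : Int)), (pb, 0), (pc, 1), (pd, 1)] (fun t => t.1) false
    let labels := pts.map (fun t => t.2)
    labels == [0, 1, 0, 1] || labels == [1, 0, 1, 0]

-- ===== PRECONDITION & SPEC =====
-- Pre_ excludes exactly the inputs on which A raises KeyError (a value among a,b,c,d missing from order)
def Pre_chords_cross (a : Int) (b : Int) (c : Int) (d : Int) (order : List Int) : Prop :=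
  a ∈ order ∧ b ∈ order ∧ c ∈ order ∧ d ∈ order
instance (a : Int) (b : Int) (c : Int) (d : Int) (order : List Int) : Decidable (Pre_chords_cross a b c d order) := by unfold Pre_chords_cross; infer_instance
def pvWitness_chords_cross : Int × Int × Int × Int × List Int := (1, 3, 2, 4, [1, 2, 3, 4])

def Spec_chords_cross (a : Int) (b : Int) (c : Int) (d : Int) (order : List Int) (out : Bool) : Prop := out = chords_cross_alt a b c d order
instance (a : Int) (b : Int) (c : Int) (d : Int) (order : List Int) (out : Bool) : Decidable (Spec_chords_cross a b c d order out) := by unfold Spec_chords_cross; infer_instance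

-- ===== CLAIM (what is proved, stated in full; the proofs are below) =====
def Claim_equal_chords_cross : Prop := ∀ (a : Int) (b : Int) (c : Int) (d : Int) (order : List Int), Dom_chords_cross a b c d order → Pre_chords_cross a b c d order → Spec_chords_cross a b c d order (chords_cross a b c d order)

-- ===== LEMMAS AND PROOFS =====

-- a key inserted by the fold stays resolvable
lemma pvFold_isSome (pairs : List (Int × Int)) (d0 : PySem.Dict Int Int) (x : Int)
    (h : (∃ p ∈ pairs, p.2 = x) ∨ (d0.get? x).isSome) :
    ((pairs.foldl (fun dct iv => dct.insert iv.2 iv.1) d0).get? x).isSome := by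
  induction pairs generalizing d0 with
  | nil =>
    simp only [List.foldl]
    rcases h with ⟨p, hp, _⟩ | h
    · exact absurd hp (List.not_mem_nil)
    · exact h
  | cons p rest ih =>
    simp only [List.foldl]
    apply ih
    rcases h with ⟨q, hq, hqx⟩ | h
    · rcases List.mem_cons.mp hq with rfl | hq'
      · right; rw [hqx, PySem.Dict.get?_insert_self]; rfl
      · exact Or.inl ⟨q, hq', hqx⟩
    · right
      rw [PySem.Dict.get?_insert]
      split
      · rfl
      · exact h

-- any value resolvable after the fold is a first component of a pair (or was already there)
lemma pvFold_val (pairs : List (Int × Int)) (d0 : PySem.Dict Int Int) (x v : Int)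
    (h : (pairs.foldl (fun dct iv => dct.insert iv.2 iv.1) d0).get? x = some v) :
    (∃ p ∈ pairs, p.1 = v) ∨ d0.get? x = some v := by
  induction pairs generalizing d0 with
  | nil => exact Or.inr h
  | cons p rest ih =>
    simp only [List.foldl] at h
    rcases ih _ h with ⟨q, hq, hqv⟩ | h'
    · exact Or.inl ⟨q, List.mem_cons_of_mem _ hq, hqv⟩
    · rw [PySem.Dict.get?_insert] at h'
      split at h'
      · exact Or.inl ⟨p, List.mem_cons_self, Option.some_inj.mp h'⟩
      · exact Or.inr h'

lemma pvPos_get (order : List Int) (x : Int) (hx : x ∈ order) :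
    ∃ i : Int, (pvPosDict order).get? x = some i ∧ 0 ≤ i ∧ i < (order.length : Int) := by
  obtain ⟨k, hk, hkx⟩ := List.mem_iff_getElem.mp hx
  have hmem : ((k : Int), x) ∈ PySem.List.enumerate order 0 := by
    rw [PySem.List.mem_enumerate_iff]
    exact ⟨k, hk, by simp [hkx]⟩
  have hsome := pvFold_isSome (PySem.List.enumerate order 0) PySem.Dict.empty x
    (Or.inl ⟨((k : Int), x), hmem, rfl⟩)
  obtain ⟨i, hi⟩ := Option.isSome_iff_exists.mp hsome
  refine ⟨i, hi, ?_⟩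
  rcases pvFold_val _ _ _ _ hi with ⟨p, hp, hpv⟩ | hempty
  · rw [PySem.List.mem_enumerate_iff] at hp
    obtain ⟨m, hm, rfl⟩ := hp
    simp at hpv
    omega
  · simp [PySem.Dict.get?_empty] at hempty

-- floor-mod of a difference of two in-range positions
lemma pvDelta (p q n : Int) (hp0 : 0 ≤ p) (hpn : p < n) (hq0 : 0 ≤ q) (hqn : q < n) :
    PySem.Int.mod (p - q) n = if q ≤ p then p - q else p - q + n := by
  rw [PySem.Int.mod_eq_emod_of_pos (by omega)]
  split
  · exact Int.emod_eq_of_lt (by omega) (by omega)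
  · have h1 : (p - q) % n = (p - q + n * 1) % n := (Int.add_mul_emod_self_left (a := p - q) (b := n) (c := 1)).symm
    rw [h1]
    have : p - q + n * 1 = p - q + n := by ring
    rw [this, Int.emod_eq_of_lt (by omega) (by omega)]

lemma pvInsertBy_nil {α} (before : α → α → Bool) (x : α) :
    PySem.List.insertBy before x [] = [x] := rfl
lemma pvInsertBy_cons {α} (before : α → α → Bool) (x y : α) (ys : List α) :
    PySem.List.insertBy before x (y :: ys)
      = if before x y then x :: y :: ys else y :: PySem.List.insertBy before x ys := rfl

-- the heart: the two predicates agree as functions of the four positions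
set_option maxHeartbeats 4000000 in
lemma pvCore (pa pb pc pd n : Int)
    (ha0 : 0 ≤ pa) (han : pa < n) (hb0 : 0 ≤ pb) (hbn : pb < n)
    (hc0 : 0 ≤ pc) (hcn : pc < n) (hd0 : 0 ≤ pd) (hdn : pd < n) :
    ((decide (PySem.Int.mod (pc - pa) n < PySem.Int.mod (pb - pa) n)
        != decide (PySem.Int.mod (pd - pa) n < PySem.Int.mod (pb - pa) n))
      && !(pc == pa) && !(pd == pa) && !(pc == pb) && !(pd == pb))
    = (if pc == pa || pc == pb || pd == pa || pd == pb then false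
       else
         let pts := PySem.List.sorted [(pa, (0 : Int)), (pb, 0), (pc, 1), (pd, 1)] (fun t => t.1) false
         let labels := pts.map (fun t => t.2)
         labels == [0, 1, 0, 1] || labels == [1, 0, 1, 0]) := by
  rw [pvDelta pb pa n hb0 hbn ha0 han, pvDelta pc pa n hc0 hcn ha0 han,
      pvDelta pd pa n hd0 hdn ha0 han]
  rw [PySem.List.sorted_eq_foldl_insertBy]
  simp only [List.foldl, pvInsertBy_cons, pvInsertBy_nil]
  split_ifs <;>
    (try simp only [pvInsertBy_cons, pvInsertBy_nil]) <;> (try split_ifs) <;>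
    (try simp only [pvInsertBy_cons, pvInsertBy_nil]) <;> (try split_ifs) <;>
    (try simp_all [iff_iff_and_or_not_and_not]) <;> omega

-- ===== VERDICT (by name: the statement is the Claim_ definition above) =====
theorem chords_cross_spec : Claim_equal_chords_cross := by
  intro a b c d order _ hpre
  obtain ⟨ha, hb, hc, hd⟩ := hpre
  obtain ⟨pa, hpa, hpa0, hpan⟩ := pvPos_get order a ha
  obtain ⟨pb, hpb, hpb0, hpbn⟩ := pvPos_get order b hb
  obtain ⟨pc, hpc, hpc0, hpcn⟩ := pvPos_get order c hc
  obtain ⟨pd, hpd, hpd0, hpdn⟩ := pvPos_get order d hd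
  unfold Spec_chords_cross chords_cross chords_cross_alt
  simp only [hpa, hpb, hpc, hpd, Option.getD_some]
  exact pvCore pa pb pc pd order.length hpa0 hpan hpb0 hpbn hpc0 hpcn hpd0 hpdn
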